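-- pv_equiv track=rewrite | github.com/Rostislav97/python_practik | chapter_12/3.py | create_masks
-- ===== SOURCE A (Python) =====
-- def create_masks(word):
--     masks = []
--     for i in range(len(word)):           # первая позиция для замены
--         for j in range(i+1, len(word)):   # вторая позиция (чтобы не повторяться)
--             # Создаем список букв, заменяя i и j на None
--             mask_chars = []
--             for pos, letter in enumerate(word):
--                 if pos == i or pos == j:
--                     mask_chars.append(None)  # помечаем позиции замены
--                 else:
--                     mask_chars.append(letter)
--             masks.append(tuple(mask_chars))
--     return masks
-- ===== SOURCE B (Python) =====
-- def create_masks(word):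
--     # Explicit-stack DFS over (prefix, remaining suffix, holes to place):
--     # at each step either mask the head (one hole left) or keep it (explored after),
--     # emitting a finished mask once both holes are placed.
--     chars = tuple(word)
--     out = []
--     stack = [((), chars, 2)]
--     while stack:
--         prefix, rest, holes = stack.pop()
--         if holes == 0:
--             out.append(prefix + rest)
--         elif len(rest) >= holes:
--             head, tail = rest[0], rest[1:]
--             stack.append((prefix + (head,), tail, holes))      # keep head (second)
--             stack.append((prefix + (None,), tail, holes - 1))  # mask head (first)
--     return out
-- ===== Notes on version B (the rewrite author's own statement) =====
-- stated objective: alternative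
-- what changed: B replaces A's nested index loops with per-pair enumerate rescan by an explicit-stack DFS over (prefix, remaining suffix, holes-to-place) states that either masks or keeps the head character, emitting each mask once both holes are placed; same values in the same order.
import Mathlib
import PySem

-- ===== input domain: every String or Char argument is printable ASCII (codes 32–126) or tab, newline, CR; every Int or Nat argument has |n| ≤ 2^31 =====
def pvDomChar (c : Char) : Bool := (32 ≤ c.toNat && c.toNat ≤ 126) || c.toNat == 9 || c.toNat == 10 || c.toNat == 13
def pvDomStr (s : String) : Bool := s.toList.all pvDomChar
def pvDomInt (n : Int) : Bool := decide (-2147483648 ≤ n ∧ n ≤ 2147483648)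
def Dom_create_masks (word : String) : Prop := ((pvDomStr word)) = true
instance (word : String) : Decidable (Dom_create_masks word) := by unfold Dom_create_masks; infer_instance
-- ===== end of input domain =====

-- B builds the masks by an explicit-stack DFS over (prefix, suffix, holes-to-place) states
-- (mask the head or keep it), instead of A's nested index loops with a full enumerate
-- rescan per pair; same values, same order (objective: alternative).

-- ===== PORT A =====
def create_masks (word : String) : List (List (Option String)) :=
  let cs := word.toList
  let n : Int := cs.length
  (PySem.List.pyRange 0 n 1).foldl (fun masks i =>
    (PySem.List.pyRange (i + 1) n 1).foldl (fun masks j =>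
      masks ++ [ (PySem.List.enumerate cs 0).foldl (fun mc pl =>
          if pl.1 = i ∨ pl.1 = j then mc ++ [none]
          else mc ++ [some (String.ofList [pl.2])]) [] ]) masks) []

-- ===== PORT B =====
-- stack measure used for termination of the DFS loop
def pvStackMeasure (st : List (List (Option String) × List (Option String) × Nat)) : Nat :=
  (st.map (fun s => 3 ^ s.2.1.length)).sum

-- the while-stack loop of Source B; head of the list = top of Python's stack (append/pop at the end)
def runMasks : List (List (Option String) × List (Option String) × Nat) →
    List (List (Option String)) → List (List (Option String))
  | [], out => out
  | (p, r, h) :: stack, out =>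
    if h = 0 then runMasks stack (out ++ [p ++ r])
    else if h ≤ r.length then
      match r with
      | [] => runMasks stack out   -- unreachable: 1 ≤ h ≤ r.length
      | c :: t => runMasks ((p ++ [none], t, h - 1) :: (p ++ [c], t, h) :: stack) out
    else runMasks stack out
termination_by st _ => pvStackMeasure st
decreasing_by
  · simp [pvStackMeasure]
  · simp [pvStackMeasure]
  · simp [pvStackMeasure, pow_succ]
    have h3 : 0 < 3 ^ t.length := pow_pos (by norm_num) t.length
    omega
  · simp [pvStackMeasure]

def create_masks_alt (word : String) : List (List (Option String)) :=
  runMasks [([], word.toList.map (fun c => some (String.ofList [c])), 2)] []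

-- ===== PRECONDITION & SPEC =====
def Spec_create_masks (word : String) (out : List (List (Option String))) : Prop := out = create_masks_alt word
instance (word : String) (out : List (List (Option String))) : Decidable (Spec_create_masks word out) := by unfold Spec_create_masks; infer_instance

-- ===== CLAIM (what is proved, stated in full; the proofs are below) =====
def Claim_equal_create_masks : Prop := ∀ (word : String), Dom_create_masks word → Spec_create_masks word (create_masks word)

-- ===== LEMMAS AND PROOFS =====

-- recursive specification of the DFS: masks of `chars` with `holes` Nones, in DFS order
def goAlt : List (Option String) → Nat → List (List (Option String))
  | chars, 0 => [chars]
  | [], _+1 => []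
  | c :: tail, h+1 =>
    if (c :: tail).length < h + 1 then []
    else (goAlt tail h).map (fun rest => none :: rest)
          ++ (goAlt tail (h+1)).map (fun rest => c :: rest)

-- one unfolding step of the stack loop
lemma runMasks_cons (p r : List (Option String)) (h : Nat)
    (stack : List (List (Option String) × List (Option String) × Nat))
    (out : List (List (Option String))) :
    runMasks ((p, r, h) :: stack) out =
    if h = 0 then runMasks stack (out ++ [p ++ r])
    else if h ≤ r.length then
      match r with
      | [] => runMasks stack out
      | c :: t => runMasks ((p ++ [none], t, h - 1) :: (p ++ [c], t, h) :: stack) out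
    else runMasks stack out := by
  rw [runMasks.eq_def]

-- the stack loop computes, in order, the goAlt results of every stack entry
lemma runMasks_eq (st : List (List (Option String) × List (Option String) × Nat))
    (out : List (List (Option String))) :
    runMasks st out = out ++ (st.map (fun s => (goAlt s.2.1 s.2.2).map (s.1 ++ ·))).flatten := by
  induction st, out using runMasks.induct with
  | case1 out => rw [runMasks.eq_def]; simp
  | case2 p r stack out ih =>
    rw [show runMasks ((p, r, 0) :: stack) out = runMasks stack (out ++ [p ++ r]) from by
      rw [runMasks_cons]; rfl]
    rw [ih]
    simp [goAlt]
  | case3 p h stack out hne hle ih =>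
    exact absurd (by simpa using hle) hne
  | case4 p h stack out hne c t hle ih =>
    obtain ⟨h', rfl⟩ : ∃ h', h = h' + 1 := ⟨h - 1, by omega⟩
    rw [show runMasks ((p, c :: t, h' + 1) :: stack) out
        = runMasks ((p ++ [none], t, h' + 1 - 1) :: (p ++ [c], t, h' + 1) :: stack) out from by
      rw [runMasks_cons, if_neg hne, if_pos hle]]
    rw [ih]
    have hg : goAlt (c :: t) (h' + 1)
        = (goAlt t h').map (fun rest => none :: rest)
          ++ (goAlt t (h' + 1)).map (fun rest => c :: rest) := by
    -- the length guard is false: h' + 1 ≤ (c :: t).length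
      rw [goAlt, if_neg (by simp at hle ⊢; omega)]
    simp only [hg, List.map_cons, List.flatten_cons, List.map_append, List.map_map]
    simp [Function.comp_def, List.append_assoc]
  | case5 p r h stack out hne hle ih =>
    obtain ⟨h', rfl⟩ : ∃ h'', h = h'' + 1 := ⟨h - 1, by omega⟩
    have h0 : goAlt r (h' + 1) = [] := by
      rcases r with _ | ⟨c, t⟩
      · rw [goAlt]
      · rw [goAlt, if_pos (by simp at hle ⊢; omega)]
    rw [show runMasks ((p, r, h' + 1) :: stack) out = runMasks stack out from by
      rw [runMasks_cons, if_neg hne, if_neg hle]]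
    rw [ih]
    simp [h0]

-- push the conditional append into the appended element
lemma foldl_if_push {α β : Type} (l : List α) (p : α → Prop) [DecidablePred p]
    (a b : α → β) (acc : List β) :
    l.foldl (fun mc x => if p x then mc ++ [a x] else mc ++ [b x]) acc
      = acc ++ l.map (fun x => if p x then a x else b x) := by
  induction l generalizing acc with
  | nil => simp
  | cons y t ih => simp only [List.foldl_cons, List.map_cons, ih]; split_ifs <;> simp

-- A's inner rescan equals copy-and-overwrite at i and j
lemma inner_eq (cs : List Char) (i j : Nat) :
    (PySem.List.enumerate cs 0).map
        (fun pl => if pl.1 = (i : Int) ∨ pl.1 = (j : Int) then none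
                   else some (String.ofList [pl.2]))
      = ((cs.map (fun c => some (String.ofList [c]))).set i none).set j none := by
  apply List.ext_getElem
  · simp [PySem.List.length_enumerate]
  · intro k h1 h2
    have hk : k < cs.length := by simpa [PySem.List.length_enumerate] using h1
    simp only [List.getElem_map, PySem.List.getElem_enumerate, List.getElem_set]
    by_cases hkj : j = k
    · simp [hkj]
    · by_cases hki : i = k
      · simp [hki, hkj]
      · simp only [hki, hkj]
        simp
        omega

-- goAlt with one hole: set each position to none, in order
lemma goAlt_one (cs : List (Option String)) :
    goAlt cs 1 = (List.range cs.length).map (fun i => cs.set i none) := by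
  induction cs with
  | nil => simp [goAlt]
  | cons c t ih =>
    simp [goAlt, ih, List.range_succ_eq_map, List.map_map, Function.comp]

-- goAlt with two holes: exactly A's pair enumeration
lemma goAlt_two (cs : List (Option String)) :
    goAlt cs 2 = (List.range cs.length).flatMap (fun i =>
      (List.range' (i + 1) (cs.length - (i + 1))).map (fun j => (cs.set i none).set j none)) := by
  induction cs with
  | nil => simp [goAlt]
  | cons c t ih =>
    rw [show goAlt (c :: t) 2
        = (goAlt t 1).map (fun rest => none :: rest) ++ (goAlt t 2).map (fun rest => c :: rest)
        from by by_cases ht : t = [] <;> simp [goAlt, ht]]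
    rw [goAlt_one, ih]
    rw [List.length_cons, List.range_succ_eq_map, List.flatMap_cons, List.flatMap_map]
    congr 1
    · -- i = 0 block: none :: t.set k none  vs  j ∈ range' 1 t.length
      rw [List.map_map]
      have : t.length + 1 - (0 + 1) = t.length := by omega
      rw [this, List.range'_eq_map_range, List.map_map]
      apply List.map_congr_left
      intro k hk
      simp [Nat.add_comm 1 k]
    · -- i ≥ 1 block
      rw [List.map_flatMap, List.flatMap_def, List.flatMap_def]
      apply congrArg List.flatten
      apply List.map_congr_left
      intro i hi
      have h1 : t.length + 1 - (i.succ + 1) = t.length - (i + 1) := by omega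
      rw [List.map_map, h1, List.range'_eq_map_range, List.range'_eq_map_range, List.map_map,
        List.map_map]
      apply List.map_congr_left
      intro k hk
      simp [Nat.succ_eq_add_one, Nat.add_comm, Nat.add_left_comm]
      rw [show i + (k + 2) = (i + (k + 1)) + 1 from by omega, List.set_cons_succ]

-- ===== VERDICT (by name: the statement is the Claim_ definition above) =====
theorem create_masks_spec : Claim_equal_create_masks := by
  intro word _
  unfold Spec_create_masks create_masks create_masks_alt
  rw [runMasks_eq]
  simp only [List.map_cons, List.map_nil, List.flatten_cons, List.flatten_nil,
    List.nil_append, List.append_nil]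
  rw [goAlt_two]
  simp only [foldl_if_push, List.nil_append, PySem.List.foldl_append_singleton_eq_map,
    PySem.List.foldl_append_eq_flatMap]
  rw [List.length_map, PySem.List.pyRange_zero_natCast, List.flatMap_map, List.map_flatMap]
  rw [List.flatMap_def, List.flatMap_def]
  apply congrArg List.flatten
  apply List.map_congr_left
  intro k hk
  rw [List.mem_range] at hk
  rw [PySem.List.pyRange_one, List.map_map, List.range'_eq_map_range, List.map_map, List.map_map]
  have hlen : ((word.toList.length : Int) - ((k : Int) + 1)).toNat = word.toList.length - (k + 1) := by
    omega
  rw [hlen]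
  apply List.map_congr_left
  intro t ht
  have h := inner_eq word.toList k (k + 1 + t)
  simp only [Function.comp]
  push_cast at h ⊢
  exact h
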